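-- pv_equiv track=rewrite | github.com/bluesky0960/Sentence_similarity | 2주차_문장_유사도_검사/sync_test2.py | getBigram
-- ===== SOURCE A (Python) =====
-- def getBigram(read1, read2):
--
--     dic = {}
--     dic2 = {}
--
--     dic_length = 0
--     dic2_length = 0
--
--     for i in range(len(read1)):
--         if(i+1 >= len(read1)):
--             break
--         else:
--             dic[read1[i]+read1[i+1]] = 0
--             dic_length +=1
--
--     for i in range(len(read2)):
--         if(i+1>=len(read2)):
--             break
--         else:
--             if (read2[i]+read2[i+1]) in dic.keys():
--                 dic[read2[i]+read2[i+1]] += 1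
--             dic2_length += 1
--
--     short_length = getShortLength(dic_length, dic2_length)
--
--     return dic, short_length
--
-- def getShortLength(len1, len2):
--
--     short_length = 0
--
--     if(len1>=len2):
--         short_length = len2
--     else:
--         short_length = len1
--
--     return short_length
-- ===== SOURCE B (Python) =====
-- def getBigram(read1, read2):
--     # Materialise each string's bigram list by slicing, then build the result
--     # with a dict comprehension that counts each read1 bigram in read2's list.
--     bigs1 = [read1[i:i + 2] for i in range(len(read1) - 1)]
--     bigs2 = [read2[i:i + 2] for i in range(len(read2) - 1)]
--     result = {bg: bigs2.count(bg) for bg in bigs1}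
--     return result, min(len(bigs1), len(bigs2))
-- ===== Notes on version B (the rewrite author's own statement) =====
-- stated objective: simpler
-- what changed: B drops A's mutable-dict scanning entirely: it materialises both strings' bigram lists by slicing, builds the result with a dict comprehension whose value is a per-key list.count over read2's bigram list (a nested scan instead of A's zero-init-then-increment dict passes), and returns min of the two list lengths.
import Mathlib
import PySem

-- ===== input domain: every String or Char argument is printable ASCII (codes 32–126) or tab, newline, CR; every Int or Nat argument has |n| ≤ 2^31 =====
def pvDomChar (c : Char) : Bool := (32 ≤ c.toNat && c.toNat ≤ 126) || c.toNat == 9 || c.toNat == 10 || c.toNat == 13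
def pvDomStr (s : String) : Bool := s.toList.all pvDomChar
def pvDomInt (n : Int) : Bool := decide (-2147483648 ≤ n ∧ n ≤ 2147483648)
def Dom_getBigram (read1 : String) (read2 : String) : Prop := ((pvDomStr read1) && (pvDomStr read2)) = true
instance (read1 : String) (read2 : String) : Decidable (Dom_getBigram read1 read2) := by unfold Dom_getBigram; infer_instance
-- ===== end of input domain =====

-- B replaces A's mutable zero-init-then-conditional-increment dict passes by sliced bigram
-- lists, a dict comprehension with a per-key list.count nested scan, and min of the list
-- lengths (objective: simpler; not faster).

-- ===== PORT A =====
def getShortLength (len1 : Int) (len2 : Int) : Int :=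
  if len1 ≥ len2 then len2 else len1

def getBigram (read1 : String) (read2 : String) : (List (String × Int)) × Int :=
  let l1 := read1.toList
  let l2 := read2.toList
  -- first loop; Python's 'break' at i+1 >= len(read1) is modelled by skipping the
  -- remaining iterations, exact because the break condition is monotone in i
  let s1 : PySem.Dict String Int × Int :=
    (PySem.List.pyRange 0 (l1.length : Int) 1).foldl
      (fun s i =>
        if (l1.length : Int) ≤ i + 1 then s
        else (s.1.insert (String.ofList [PySem.List.pyGetD l1 i ' ', PySem.List.pyGetD l1 (i + 1) ' ']) 0,
              s.2 + 1))
      (PySem.Dict.empty, 0)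
  -- second loop, same break treatment; read2[i]+read2[i+1] is written twice, as in A
  let s2 : PySem.Dict String Int × Int :=
    (PySem.List.pyRange 0 (l2.length : Int) 1).foldl
      (fun s i =>
        if (l2.length : Int) ≤ i + 1 then s
        else ((if s.1.contains (String.ofList [PySem.List.pyGetD l2 i ' ', PySem.List.pyGetD l2 (i + 1) ' ']) then
                 s.1.modify (String.ofList [PySem.List.pyGetD l2 i ' ', PySem.List.pyGetD l2 (i + 1) ' ']) 0 (fun x => x + 1)
               else s.1),
              s.2 + 1))
      (s1.1, 0)
  ((s2.1).items, getShortLength s1.2 s2.2)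

-- ===== PORT B =====
def getBigram_alt (read1 : String) (read2 : String) : (List (String × Int)) × Int :=
  let l1 := read1.toList
  let l2 := read2.toList
  -- bigs = [read[i:i+2] for i in range(len(read)-1)]
  let bigs1 := (PySem.List.pyRange 0 ((l1.length : Int) - 1) 1).map
      (fun i => String.ofList (PySem.List.slice l1 (some i) (some (i + 2))))
  let bigs2 := (PySem.List.pyRange 0 ((l2.length : Int) - 1) 1).map
      (fun i => String.ofList (PySem.List.slice l2 (some i) (some (i + 2))))
  -- {bg: bigs2.count(bg) for bg in bigs1}
  let result := bigs1.foldl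
      (fun (d : PySem.Dict String Int) bg => d.insert bg ((PySem.List.count bigs2 bg : Nat) : Int))
      PySem.Dict.empty
  (result.items, min (bigs1.length : Int) (bigs2.length : Int))

-- ===== PRECONDITION & SPEC =====
def Spec_getBigram (read1 : String) (read2 : String) (out : (List (String × Int)) × Int) : Prop := out = getBigram_alt read1 read2
instance (read1 : String) (read2 : String) (out : (List (String × Int)) × Int) : Decidable (Spec_getBigram read1 read2 out) := by unfold Spec_getBigram; infer_instance

-- ===== CLAIM (what is proved, stated in full; the proofs are below) =====
def Claim_equal_getBigram : Prop := ∀ (read1 : String) (read2 : String), Dom_getBigram read1 read2 → Spec_getBigram read1 read2 (getBigram read1 read2)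

-- ===== LEMMAS AND PROOFS =====

/-- The list of bigrams of `l`, in order. -/
def pvBigs (l : List Char) : List String :=
  (l.zip l.tail).map (fun p => String.ofList [p.1, p.2])

lemma pvBigs_eq_map (l : List Char) :
    pvBigs l = (List.range (l.length - 1)).map
      (fun k => String.ofList [l.getD k ' ', l.getD (k + 1) ' ']) := by
  apply List.ext_getElem
  · simp [pvBigs]
  · intro i h1 h2
    simp only [pvBigs, List.getElem_map, List.getElem_range, List.getElem_zip, List.getElem_tail]
    have hlen : i + 1 < l.length := by simp [pvBigs] at h1; omega
    rw [List.getD_eq_getElem _ _ (by omega), List.getD_eq_getElem _ _ hlen]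

/-- A two-element slice inside the list is the pair of elements. -/
lemma pvSlice_two (l : List Char) (k : Nat) (h : k + 1 < l.length) :
    (l.drop k).take 2 = [l.getD k ' ', l.getD (k + 1) ' '] := by
  apply List.ext_getElem
  · simp; omega
  · intro i h1 h2
    have hi : i = 0 ∨ i = 1 := by simp at h1; omega
    rcases hi with rfl | rfl
    · simp [List.getElem_take, List.getElem_drop, List.getD,
        List.getElem?_eq_getElem (show k < l.length by omega)]
    · simp [List.getElem_take, List.getElem_drop, List.getD, List.getElem?_eq_getElem h]

/-- B's slicing comprehension produces exactly the bigram list. -/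
lemma pvSliceBigs (l : List Char) :
    (PySem.List.pyRange 0 ((l.length : Int) - 1) 1).map
        (fun i => String.ofList (PySem.List.slice l (some i) (some (i + 2))))
      = pvBigs l := by
  rw [PySem.List.pyRange_one, List.map_map, pvBigs_eq_map]
  have hto : (((l.length : Int) - 1) - 0).toNat = l.length - 1 := by omega
  rw [hto]
  apply List.map_congr_left
  intro k hk
  have hkl : k + 1 < l.length := by
    have := List.mem_range.mp hk; omega
  simp only [Function.comp_apply, zero_add]
  have h2 : ((k : Int) + 2) = (k : Int) + ((2 : Nat) : Int) := by push_cast; ring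
  rw [h2, PySem.List.slice_natCast_add, pvSlice_two l k hkl]

/-- A's guarded index loop over `range(len(l))` with break at `i+1 >= len(l)`
is a fold over the bigram list. -/
lemma pvLoop {σ : Type} (l : List Char) (step : σ → String → σ) (init : σ) :
    (PySem.List.pyRange 0 (l.length : Int) 1).foldl
      (fun s i => if (l.length : Int) ≤ i + 1 then s
        else step s (String.ofList [PySem.List.pyGetD l i ' ', PySem.List.pyGetD l (i + 1) ' ']))
      init
    = (pvBigs l).foldl step init := by
  rw [PySem.List.pyRange_one, List.foldl_map, pvBigs_eq_map, List.foldl_map]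
  simp only [sub_zero, Int.toNat_natCast, zero_add]
  cases l.length with
  | zero => simp
  | succ m =>
    rw [List.range_succ, List.foldl_append]
    simp only [List.foldl_cons, List.foldl_nil, Nat.add_sub_cancel]
    rw [if_pos (by push_cast; omega)]
    apply PySem.List.foldl_congr_mem
    intro acc k hk
    have hkm : k < m := List.mem_range.mp hk
    rw [if_neg (by push_cast; omega)]
    have h1 : PySem.List.pyGetD l (k : Int) ' ' = l.getD k ' ' := PySem.List.pyGetD_natCast l k ' '
    have h2 : PySem.List.pyGetD l ((k : Int) + 1) ' ' = l.getD (k + 1) ' ' := by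
      rw [show ((k : Int) + 1) = ((k + 1 : Nat) : Int) by push_cast; ring]
      exact PySem.List.pyGetD_natCast l (k + 1) ' '
    rw [h1, h2]

lemma pvNodupKeys (f : String → Int) :
    ∀ (K : List String) (d : PySem.Dict String Int), d.keys.Nodup →
      (K.foldl (fun d k => d.insert k (f k)) d).keys.Nodup := by
  intro K
  induction K with
  | nil => intro d h; simpa using h
  | cons k K ih =>
    intro d h
    simpa using ih _ (PySem.Dict.nodup_keys_insert d k (f k) h)

lemma pvValuesZero :
    ∀ (K : List String) (d : PySem.Dict String Int), (∀ p ∈ d.items, p.2 = 0) →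
      ∀ p ∈ (K.foldl (fun d k => d.insert k (0 : Int)) d).items, p.2 = 0 := by
  intro K
  induction K with
  | nil => intro d h; simpa using h
  | cons k K ih =>
    intro d h
    refine ih _ ?_
    intro p hp
    rcases (PySem.Dict.mem_items_insert d k 0 p).mp hp with h1 | ⟨h1, _⟩
    · simp [h1]
    · exact h p h1

/-- A's second loop: conditionally incrementing existing keys adds each key's
count in `C` to its value, keeping the items list's keys and order. -/
lemma pvIncr :
    ∀ (C : List String) (d : PySem.Dict String Int), d.keys.Nodup →
      (C.foldl (fun d c => if d.contains c then d.modify c 0 (fun x => x + 1) else d) d).items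
      = d.items.map (fun p => (p.1, p.2 + (C.count p.1 : Int))) := by
  intro C
  induction C with
  | nil => intro d h; simp
  | cons c C ih =>
    intro d h
    simp only [List.foldl_cons]
    by_cases hc : d.contains c = true
    · rw [if_pos hc]
      have hkeys : (d.modify c 0 (fun x => x + 1)).keys = d.keys := by
        rw [PySem.Dict.keys_modify, PySem.Dict.keys_insert_of_contains d _ hc]
      rw [ih _ (by rw [hkeys]; exact h)]
      have hitems : (d.modify c 0 (fun x => x + 1)).items
          = d.items.map (fun p => if p.1 == c then (c, d.getD c 0 + 1) else p) := by
        simp only [PySem.Dict.modify]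
        exact PySem.Dict.items_insert_of_contains d _ hc
      rw [hitems, List.map_map]
      apply List.map_congr_left
      intro p hp
      by_cases hpc : p.1 = c
      · have hget : d.getD c 0 = p.2 := by
          rw [← hpc, PySem.Dict.getD_eq_get?_getD,
            PySem.Dict.get?_of_mem_items d (by simpa using hp) h]
          rfl
        simp only [Function.comp_apply, hpc, beq_self_eq_true, if_true, hget,
          List.count_cons_self]
        refine Prod.ext rfl ?_
        push_cast; ring
      · simp only [Function.comp_apply]
        rw [if_neg (show ¬ (p.1 == c) = true by simpa using hpc)]
        simp [Ne.symm hpc]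
    · rw [if_neg hc, ih _ h]
      apply List.map_congr_left
      intro p hp
      have hne : p.1 ≠ c := by
        intro he
        apply hc
        rw [PySem.Dict.contains_iff_mem_keys, ← he]
        exact List.mem_map_of_mem hp
      simp [Ne.symm hne]

/-- Inserting key-determined values parallels inserting zeros. -/
lemma pvPair (v : String → Int) :
    ∀ (K : List String) (d1 d2 : PySem.Dict String Int),
      d2.items = d1.items.map (fun p => (p.1, v p.1)) →
      (K.foldl (fun d k => d.insert k (v k)) d2).items
      = (K.foldl (fun d k => d.insert k (0 : Int)) d1).items.map (fun p => (p.1, v p.1)) := by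
  intro K
  induction K with
  | nil => intro d1 d2 h; simpa using h
  | cons k K ih =>
    intro d1 d2 h
    simp only [List.foldl_cons]
    apply ih
    have hcont : d2.contains k = d1.contains k := by
      simp only [PySem.Dict.contains, h, List.any_map]
      rfl
    by_cases hk : d1.contains k = true
    · rw [PySem.Dict.items_insert_of_contains d2 _ (hcont.trans hk),
        PySem.Dict.items_insert_of_contains d1 _ hk, h, List.map_map, List.map_map]
      apply List.map_congr_left
      intro p _
      by_cases hpk : p.1 = k
      · simp [Function.comp, hpk]
      · simp [Function.comp, hpk]
    · rw [PySem.Dict.items_insert_of_not_contains d2 _ (by rw [hcont]; simpa using hk),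
        PySem.Dict.items_insert_of_not_contains d1 _ (by simpa using hk), h, List.map_append]
      rfl

lemma pvLen (L : List String) : L.foldl (fun (n : Int) _ => n + 1) 0 = (L.length : Int) := by
  rw [PySem.List.foldl_add L (fun _ => 1) 0]
  simp

-- ===== VERDICT (by name: the statement is the Claim_ definition above) =====
theorem getBigram_spec : Claim_equal_getBigram := by
  intro r1 r2 _
  unfold Spec_getBigram
  simp only [getBigram, getBigram_alt]
  have e1 := pvLoop r1.toList
    (fun (s : PySem.Dict String Int × Int) bg => (s.1.insert bg 0, s.2 + 1))
    (PySem.Dict.empty, 0)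
  rw [e1, PySem.List.foldl_prod_mk
    (fun (d : PySem.Dict String Int) (bg : String) => d.insert bg 0)
    (fun (n : Int) _ => n + 1) (pvBigs r1.toList) PySem.Dict.empty 0]
  dsimp only
  have e2 := pvLoop r2.toList
    (fun (s : PySem.Dict String Int × Int) bg =>
      ((if s.1.contains bg then s.1.modify bg 0 (fun x => x + 1) else s.1), s.2 + 1))
    ((pvBigs r1.toList).foldl (fun (d : PySem.Dict String Int) bg => d.insert bg 0) PySem.Dict.empty, 0)
  rw [e2, PySem.List.foldl_prod_mk
    (fun (d : PySem.Dict String Int) (bg : String) =>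
      if d.contains bg then d.modify bg 0 (fun x => x + 1) else d)
    (fun (n : Int) _ => n + 1) (pvBigs r2.toList)
    ((pvBigs r1.toList).foldl (fun (d : PySem.Dict String Int) bg => d.insert bg 0) PySem.Dict.empty) 0]
  dsimp only
  rw [pvLen, pvLen, pvSliceBigs r1.toList, pvSliceBigs r2.toList]
  set K := pvBigs r1.toList with hK
  set C := pvBigs r2.toList with hC
  set d0 := K.foldl (fun (d : PySem.Dict String Int) bg => d.insert bg 0) PySem.Dict.empty with hd0
  simp only [Prod.mk.injEq]
  constructor
  · -- the items lists agree
    have hnodup : d0.keys.Nodup :=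
      pvNodupKeys (fun _ => 0) K PySem.Dict.empty PySem.Dict.nodup_keys_empty
    have h1 : (C.foldl (fun (d : PySem.Dict String Int) bg => if d.contains bg then d.modify bg 0 (fun x => x + 1) else d) d0).items
        = d0.items.map (fun p => (p.1, p.2 + (C.count p.1 : Int))) := pvIncr C d0 hnodup
    have h2 : (K.foldl (fun (d : PySem.Dict String Int) bg => d.insert bg ((PySem.List.count C bg : Nat) : Int)) PySem.Dict.empty).items
        = d0.items.map (fun p => (p.1, ((PySem.List.count C p.1 : Nat) : Int))) :=
      pvPair (fun k => ((PySem.List.count C k : Nat) : Int)) K PySem.Dict.empty PySem.Dict.empty rfl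
    rw [h1, h2]
    apply List.map_congr_left
    intro p hp
    have h0 : p.2 = 0 := pvValuesZero K PySem.Dict.empty (by intro q hq; cases hq) p hp
    rw [h0, PySem.List.count_eq]
    simp
  · -- the short lengths agree
    simp only [getShortLength]
    split_ifs with h <;> omega
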